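-- pv_equiv track=rewrite | github.com/Horn1998/LeetCode | 5232.替换字串得到平衡子串(双指针）.py | balancedString
-- ===== SOURCE A (Python) =====
-- def balancedString(s):
--     #初始化需要参数
--     length = len(s)
--     n = length // 4 #整除获取平衡状态下每个数字应该出现的次数
--     counts = [0 for _ in range(4)]              #记录每个字母出现次数
--     dicts = {'Q':0, 'W':1, 'E':2, 'R':3}       #确定字母与位置之间映射关系
--     dp = [[0, 0, 0, 0] for _ in range(length)]
--     need = [0 for _ in range(4)]
--     #初始化
--     for i in range(length):
--         index = dicts[s[i]]
--         counts[index] += 1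
--         dp[i] = [counts[j] for j in range(4)]
--
--     #记录字母超出平均值的个数
--     need = [counts[i] - n if counts[i] > n else 0 for i in range(4)]
--     #如果全为0 直接输出平衡状态值0
--     if sum(need) == 0:
--         return 0
--
--     #下方参考题解
--     #采用双指针，求取含有所有超额字母的最小情况
--     last = length - 1
--     for i in range(length):
--         if dp[i][0] >= need[0] and dp[i][1] >= need[1] and dp[i][2] >= need[2] and dp[i][3] >= need[3]:
--             last = i
--             break
--
--     i, j = 0, last
--     res = last + 1
--     while i < length and j < length:
--             if dp[j][0] - dp[i][0] < need[0] or dp[j][1] - dp[i][1] < need[1] or dp[j][2] - dp[i][2] < need[2] or dp[j][3] - dp[i][3] < need[3]: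
--                 j += 1
--             else:
--                 res = min(j - i, res)
--                 i += 1
--     return res
-- ===== SOURCE B (Python) =====
-- def balancedString(s):
--     n = len(s) // 4
--     cnt = {'Q': 0, 'W': 0, 'E': 0, 'R': 0}
--     for c in s:
--         cnt[c] += 1
--     if all(v <= n for v in cnt.values()):
--         return 0
--     res = len(s)
--     left = 0
--     for right in range(len(s)):
--         cnt[s[right]] -= 1
--         while left <= right and all(v <= n for v in cnt.values()):
--             if right - left + 1 < res:
--                 res = right - left + 1
--             cnt[s[left]] += 1
--             left += 1
--     return res
-- ===== Notes on version B (the rewrite author's own statement) =====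
-- stated objective: idiomatic
-- what changed: Replaces A's precomputed per-index prefix-count table (dp) plus a separate scan for the first valid prefix and a step-one-pointer-per-iteration while loop by the standard single-pass sliding window: one running dict of letter counts outside the current window, advancing right and shrinking left while the window stays replaceable.
import Mathlib
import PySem

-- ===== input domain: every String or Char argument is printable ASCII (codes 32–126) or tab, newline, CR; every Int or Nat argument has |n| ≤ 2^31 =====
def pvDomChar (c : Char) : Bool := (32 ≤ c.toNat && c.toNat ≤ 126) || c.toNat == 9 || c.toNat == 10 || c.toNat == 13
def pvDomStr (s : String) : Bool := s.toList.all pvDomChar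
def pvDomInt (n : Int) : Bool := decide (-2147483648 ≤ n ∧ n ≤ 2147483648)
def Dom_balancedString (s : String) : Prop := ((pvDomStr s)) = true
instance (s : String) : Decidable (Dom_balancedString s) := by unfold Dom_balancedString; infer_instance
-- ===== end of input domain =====

-- B replaces A's dp prefix-count table, first-valid-prefix scan and two-pointer while loop
-- by the standard sliding window over a dict of letter counts outside the window (idiomatic).

-- ===== PORT A =====
-- dicts = {'Q':0, 'W':1, 'E':2, 'R':3}
def pvQwerDict : PySem.Dict Char Int :=
  ((((PySem.Dict.empty).insert 'Q' 0).insert 'W' 1).insert 'E' 2).insert 'R' 3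

-- Python list indexing xs[i] for the in-range indices A uses (0..3 / i < length); exact there
def pvGetL (xs : List Int) (i : Nat) : Int := xs.getD i 0
def pvGetDp (dp : List (List Int)) (i : Nat) : List Int := dp.getD i []

-- body of `for i in range(length): index = dicts[s[i]]; counts[index] += 1; dp[i] = [counts[j] for j in range(4)]`
-- (dicts[s[i]] raises KeyError outside Pre_; the getD default is never used inside Pre_)
def pvStepA (st : List Int × List (List Int)) (c : Char) : List Int × List (List Int) :=
  let index := (pvQwerDict.getD c 0).toNat
  let counts := st.1.set index (pvGetL st.1 index + 1)
  (counts, st.2 ++ [(List.range 4).map (fun j => pvGetL counts j)])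

-- the double-pointer while loop of A
def pvLoopA (dp : List (List Int)) (need : List Int) (length i j : Nat) (res : Int) : Int :=
  if _h : i < length ∧ j < length then
    if pvGetL (pvGetDp dp j) 0 - pvGetL (pvGetDp dp i) 0 < pvGetL need 0 ∨
       pvGetL (pvGetDp dp j) 1 - pvGetL (pvGetDp dp i) 1 < pvGetL need 1 ∨
       pvGetL (pvGetDp dp j) 2 - pvGetL (pvGetDp dp i) 2 < pvGetL need 2 ∨
       pvGetL (pvGetDp dp j) 3 - pvGetL (pvGetDp dp i) 3 < pvGetL need 3 then
      pvLoopA dp need length i (j + 1) res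
    else
      pvLoopA dp need length (i + 1) j (min ((j : Int) - (i : Int)) res)
  else res
termination_by (length - i) + (length - j)
decreasing_by all_goals omega

def balancedString (s : String) : Int :=
  let length := s.toList.length
  let n : Int := PySem.Int.floordiv (length : Int) 4
  let init := s.toList.foldl pvStepA ([0, 0, 0, 0], [])
  let counts := init.1
  let dp := init.2
  let need := (List.range 4).map (fun i => if pvGetL counts i > n then pvGetL counts i - n else 0)
  if need.sum = 0 then 0
  else
    let last :=
      match (List.range length).find? (fun i =>
        decide (pvGetL need 0 ≤ pvGetL (pvGetDp dp i) 0) &&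
        decide (pvGetL need 1 ≤ pvGetL (pvGetDp dp i) 1) &&
        decide (pvGetL need 2 ≤ pvGetL (pvGetDp dp i) 2) &&
        decide (pvGetL need 3 ≤ pvGetL (pvGetDp dp i) 3)) with
      | some i => i
      | none => length - 1
    pvLoopA dp need length 0 last ((last : Int) + 1)

-- ===== PORT B =====
-- cnt = {'Q': 0, 'W': 0, 'E': 0, 'R': 0}
def pvCnt0 : PySem.Dict Char Int :=
  ((((PySem.Dict.empty).insert 'Q' 0).insert 'W' 0).insert 'E' 0).insert 'R' 0

-- all(v <= n for v in cnt.values())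
def pvAllLE (cnt : PySem.Dict Char Int) (n : Int) : Bool := cnt.values.all (fun v => v ≤ n)

-- the inner `while left <= right and all(...)` loop; cnt[s[left]] += 1 via modify
-- (the modify default is never used inside Pre_, where the key is present; s[left] is in range, getD exact)
def pvShrink (cs : List Char) (n : Int) (right : Nat) :
    PySem.Dict Char Int → Nat → Int → PySem.Dict Char Int × Nat × Int :=
  fun cnt left res =>
    if left ≤ right ∧ pvAllLE cnt n then
      pvShrink cs n right (cnt.modify (cs.getD left ' ') 0 (· + 1)) (left + 1)
        (if (right : Int) - (left : Int) + 1 < res then (right : Int) - (left : Int) + 1 else res)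
    else (cnt, left, res)
termination_by _ left _ => right + 1 - left
decreasing_by omega

-- the outer `for right in range(len(s))` loop; cnt[s[right]] -= 1 via modify (key present inside Pre_)
def pvOuter (cs : List Char) (n : Int) :
    Nat → PySem.Dict Char Int × Nat × Int → PySem.Dict Char Int × Nat × Int :=
  fun right st =>
    if _h : right < cs.length then
      let cnt := st.1.modify (cs.getD right ' ') 0 (· - 1)
      pvOuter cs n (right + 1) (pvShrink cs n right cnt st.2.1 st.2.2)
    else st
termination_by right _ => cs.length - right
decreasing_by omega

def balancedString_alt (s : String) : Int :=
  let cs := s.toList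
  let n : Int := PySem.Int.floordiv (cs.length : Int) 4
  let cnt := cs.foldl (fun d c => d.modify c 0 (· + 1)) pvCnt0
  if pvAllLE cnt n then 0
  else (pvOuter cs n 0 (cnt, 0, (cs.length : Int))).2.2

-- ===== PRECONDITION & SPEC =====
-- Pre_ excludes exactly the strings containing a character other than 'Q','W','E','R':
-- on those both Pythons raise KeyError (A at dicts[s[i]], B at cnt[c] += 1).
def Pre_balancedString (s : String) : Prop := s.toList.all (fun c => c ∈ (['Q', 'W', 'E', 'R'] : List Char)) = true
instance (s : String) : Decidable (Pre_balancedString s) := by unfold Pre_balancedString; infer_instance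

def pvWitness_balancedString : String := "QR"

def Spec_balancedString (s : String) (out : Int) : Prop := out = balancedString_alt s
instance (s : String) (out : Int) : Decidable (Spec_balancedString s out) := by unfold Spec_balancedString; infer_instance

-- ===== CLAIM (what is proved, stated in full; the proofs are below) =====
def Claim_equal_balancedString : Prop :=
  ∀ (s : String), Dom_balancedString s → Pre_balancedString s → Spec_balancedString s (balancedString s)

-- ===== LEMMAS AND PROOFS =====

-- spec-level notions the two ports are related through
def pvQW : List Char := ['Q', 'W', 'E', 'R']
def pvN (cs : List Char) : Nat := cs.length / 4
def pvNeed (cs : List Char) (c : Char) : Nat := cs.count c - pvN cs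
-- "the window [l, r) can absorb every excess letter"
def pvGood (cs : List Char) (l r : Nat) : Prop :=
  ∀ c ∈ pvQW, pvNeed cs c + ((cs.take l).count c) ≤ (cs.take r).count c
-- "some letter exceeds n": the unbalanced case
def pvHot (cs : List Char) : Prop := ∃ c ∈ pvQW, pvN cs < cs.count c

-- prefix/window counts as the ports see them
def pvSnap (p : List Char) : List Int :=
  [(p.count 'Q' : Int), (p.count 'W' : Int), (p.count 'E' : Int), (p.count 'R' : Int)]
def pvDpOf (cs : List Char) : List (List Int) :=
  (List.range cs.length).map (fun i => pvSnap (cs.take (i + 1)))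
def pvMkCnt (a b c d : Int) : PySem.Dict Char Int :=
  PySem.Dict.mk [('Q', a), ('W', b), ('E', c), ('R', d)]
-- count of letter c OUTSIDE the window [l, e)
def pvOutC (cs : List Char) (l e : Nat) (c : Char) : Int :=
  (cs.count c : Int) - ((cs.take e).count c : Int) + ((cs.take l).count c : Int)
def pvCntOf (cs : List Char) (l e : Nat) : PySem.Dict Char Int :=
  pvMkCnt (pvOutC cs l e 'Q') (pvOutC cs l e 'W') (pvOutC cs l e 'E') (pvOutC cs l e 'R')
def pvNeedL (cs : List Char) : List Int :=
  [(pvNeed cs 'Q' : Int), (pvNeed cs 'W' : Int), (pvNeed cs 'E' : Int), (pvNeed cs 'R' : Int)]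

theorem pv_take_count_mono (cs : List Char) (c : Char) {r r' : Nat} (h : r ≤ r') :
    (cs.take r).count c ≤ (cs.take r').count c :=
  List.Sublist.count_le c (List.take_sublist_take_left h)

theorem pvGood_mono (cs : List Char) {l l' r r' : Nat} (hl : l' ≤ l) (hr : r ≤ r')
    (h : pvGood cs l r) : pvGood cs l' r' := by
  intro c hc
  have h1 := pv_take_count_mono cs c hl
  have h2 := pv_take_count_mono cs c hr
  have := h c hc
  omega

theorem pvGood_full (cs : List Char) : pvGood cs 0 cs.length := by
  intro c _
  simp only [List.take_zero, List.count_nil, List.take_of_length_le (le_refl cs.length), pvNeed]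
  omega

theorem pvGood_not_of_le (cs : List Char) (hH : pvHot cs) {l r : Nat} (hrl : r ≤ l) :
    ¬ pvGood cs l r := by
  intro hg
  obtain ⟨c, hc, hlt⟩ := hH
  have h1 := hg c hc
  have h2 := pv_take_count_mono cs c hrl
  have : pvNeed cs c = cs.count c - pvN cs := rfl
  omega

theorem pvHot_len_pos (cs : List Char) (hH : pvHot cs) : 0 < cs.length := by
  obtain ⟨c, _, hlt⟩ := hH
  have := List.count_le_length (a := c) (l := cs)
  omega

theorem pvGood_zero_zero_iff (cs : List Char) : pvGood cs 0 0 ↔ ¬ pvHot cs := by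
  unfold pvGood pvHot pvNeed
  simp [pvQW]
  omega

-- the initialization loop of A builds exactly the prefix-count snapshots
theorem pvStepA_Q (a b c d : Int) (dp : List (List Int)) :
    pvStepA ([a,b,c,d], dp) 'Q' = ([a+1,b,c,d], dp ++ [[a+1,b,c,d]]) := rfl
theorem pvStepA_W (a b c d : Int) (dp : List (List Int)) :
    pvStepA ([a,b,c,d], dp) 'W' = ([a,b+1,c,d], dp ++ [[a,b+1,c,d]]) := rfl
theorem pvStepA_E (a b c d : Int) (dp : List (List Int)) :
    pvStepA ([a,b,c,d], dp) 'E' = ([a,b,c+1,d], dp ++ [[a,b,c+1,d]]) := rfl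
theorem pvStepA_R (a b c d : Int) (dp : List (List Int)) :
    pvStepA ([a,b,c,d], dp) 'R' = ([a,b,c,d+1], dp ++ [[a,b,c,d+1]]) := rfl

theorem pvSnap_append (p : List Char) (c : Char) (hc : c ∈ pvQW) :
    pvSnap (p ++ [c]) =
      match c with
      | 'Q' => [(p.count 'Q' : Int) + 1, (p.count 'W' : Int), (p.count 'E' : Int), (p.count 'R' : Int)]
      | 'W' => [(p.count 'Q' : Int), (p.count 'W' : Int) + 1, (p.count 'E' : Int), (p.count 'R' : Int)]
      | 'E' => [(p.count 'Q' : Int), (p.count 'W' : Int), (p.count 'E' : Int) + 1, (p.count 'R' : Int)]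
      | _   => [(p.count 'Q' : Int), (p.count 'W' : Int), (p.count 'E' : Int), (p.count 'R' : Int) + 1] := by
  fin_cases hc <;> simp [pvSnap, List.count_append]

theorem pvDpOf_append (p : List Char) (c : Char) :
    pvDpOf (p ++ [c]) = pvDpOf p ++ [pvSnap (p ++ [c])] := by
  simp only [pvDpOf, List.length_append, List.length_singleton, List.range_succ, List.map_append,
    List.map_cons, List.map_nil, List.take_of_length_le (by simp : (p ++ [c]).length ≤ p.length + 1)]
  congr 1
  apply List.map_congr_left
  intro i hi
  simp only [List.mem_range] at hi
  rw [List.take_append_of_le_length (by omega)]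

theorem pvInitA (cs : List Char) (hQ : ∀ c ∈ cs, c ∈ pvQW) :
    cs.foldl pvStepA ([0, 0, 0, 0], []) = (pvSnap cs, pvDpOf cs) := by
  induction cs using List.reverseRecOn with
  | nil => rfl
  | append_singleton p c ih =>
    rw [List.foldl_append, ih (fun x hx => hQ x (by simp [hx]))]
    have hc := hQ c (by simp)
    have hs := pvSnap_append p c hc
    have hd := pvDpOf_append p c
    fin_cases hc <;> simp only [List.foldl_cons, List.foldl_nil] <;> rw [hd, hs] <;>
      first
        | exact pvStepA_Q _ _ _ _ _
        | exact pvStepA_W _ _ _ _ _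
        | exact pvStepA_E _ _ _ _ _
        | exact pvStepA_R _ _ _ _ _

-- B's count dict, characterized through pvMkCnt
theorem pvMkCnt0 : pvCnt0 = pvMkCnt 0 0 0 0 := rfl
theorem pvModQ (a b c d : Int) (f : Int → Int) : (pvMkCnt a b c d).modify 'Q' 0 f = pvMkCnt (f a) b c d := rfl
theorem pvModW (a b c d : Int) (f : Int → Int) : (pvMkCnt a b c d).modify 'W' 0 f = pvMkCnt a (f b) c d := rfl
theorem pvModE (a b c d : Int) (f : Int → Int) : (pvMkCnt a b c d).modify 'E' 0 f = pvMkCnt a b (f c) d := rfl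
theorem pvModR (a b c d : Int) (f : Int → Int) : (pvMkCnt a b c d).modify 'R' 0 f = pvMkCnt a b c (f d) := rfl

theorem pvAllLE_mk (a b c d n : Int) :
    pvAllLE (pvMkCnt a b c d) n =
      (decide (a ≤ n) && decide (b ≤ n) && decide (c ≤ n) && decide (d ≤ n)) := by
  simp [pvAllLE, pvMkCnt, PySem.Dict.values, Bool.and_assoc]

theorem pvCountFold (p : List Char) (hQ : ∀ c ∈ p, c ∈ pvQW) (a b c d : Int) :
    p.foldl (fun dd ch => dd.modify ch 0 (· + 1)) (pvMkCnt a b c d) =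
      pvMkCnt (a + p.count 'Q') (b + p.count 'W') (c + p.count 'E') (d + p.count 'R') := by
  induction p generalizing a b c d with
  | nil => simp [pvMkCnt]
  | cons ch t ih =>
    have hc : ch ∈ pvQW := hQ ch (by simp)
    have ht : ∀ x ∈ t, x ∈ pvQW := fun x hx => hQ x (by simp [hx])
    fin_cases hc <;>
      simp only [List.foldl_cons, pvModQ, pvModW, pvModE, pvModR, ih ht, List.count_cons] <;>
      norm_num <;> ring_nf

theorem pvCntFold0 (cs : List Char) (hQ : ∀ c ∈ cs, c ∈ pvQW) :
    cs.foldl (fun d c => d.modify c 0 (· + 1)) pvCnt0 = pvCntOf cs 0 0 := by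
  rw [pvMkCnt0, pvCountFold cs hQ]
  simp [pvCntOf, pvOutC]

-- the floor division `len(s) // 4` is Nat division
theorem pvNInt (m : Nat) : PySem.Int.floordiv (m : Int) 4 = ((m / 4 : Nat) : Int) := by
  exact_mod_cast PySem.Int.floordiv_natCast m 4

-- the `all(v <= n ...)` test on the outside-counts dict is exactly pvGood
theorem pvAllLE_iff_good (cs : List Char) (l e : Nat) (hle : l ≤ e) :
    pvAllLE (pvCntOf cs l e) ((pvN cs : Int)) = true ↔ pvGood cs l e := by
  have hQ := pv_take_count_mono cs 'Q' hle
  have hW := pv_take_count_mono cs 'W' hle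
  have hE := pv_take_count_mono cs 'E' hle
  have hR := pv_take_count_mono cs 'R' hle
  rw [pvCntOf, pvAllLE_mk]
  unfold pvGood pvOutC pvNeed
  simp [pvQW]
  omega

-- indexing into the dp table
theorem pvDp_get (cs : List Char) (j : Nat) (hj : j < cs.length) :
    pvGetDp (pvDpOf cs) j = pvSnap (cs.take (j + 1)) := by
  unfold pvGetDp pvDpOf
  rw [List.getD_eq_getElem _ _ (by simpa using hj)]
  simp

-- A's need list
theorem pvNeedA (cs : List Char) :
    (List.range 4).map (fun i =>
        if pvGetL (pvSnap cs) i > ((pvN cs : Int)) then pvGetL (pvSnap cs) i - (pvN cs : Int) else 0) =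
      pvNeedL cs := by
  have h4 : List.range 4 = [0, 1, 2, 3] := rfl
  rw [h4]
  simp only [List.map_cons, List.map_nil, pvNeedL, pvSnap, pvGetL, pvNeed]
  simp only [List.cons.injEq, and_true]
  norm_num
  refine ⟨?_, ?_, ?_, ?_⟩ <;> split_ifs <;> omega

theorem pvNeedSum_iff (cs : List Char) : (pvNeedL cs).sum = 0 ↔ ¬ pvHot cs := by
  unfold pvNeedL pvHot pvNeed
  simp [pvQW, List.sum_cons]
  omega

-- the two-pointer window test of A is exactly ¬ pvGood (i+1) (j+1)
theorem pvCondA_iff (cs : List Char) (i j : Nat) (hi : i < cs.length) (hj : j < cs.length) :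
    (pvGetL (pvGetDp (pvDpOf cs) j) 0 - pvGetL (pvGetDp (pvDpOf cs) i) 0 < pvGetL (pvNeedL cs) 0 ∨
     pvGetL (pvGetDp (pvDpOf cs) j) 1 - pvGetL (pvGetDp (pvDpOf cs) i) 1 < pvGetL (pvNeedL cs) 1 ∨
     pvGetL (pvGetDp (pvDpOf cs) j) 2 - pvGetL (pvGetDp (pvDpOf cs) i) 2 < pvGetL (pvNeedL cs) 2 ∨
     pvGetL (pvGetDp (pvDpOf cs) j) 3 - pvGetL (pvGetDp (pvDpOf cs) i) 3 < pvGetL (pvNeedL cs) 3) ↔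
      ¬ pvGood cs (i + 1) (j + 1) := by
  rw [pvDp_get cs i hi, pvDp_get cs j hj]
  unfold pvGood pvNeedL pvSnap pvGetL pvNeed
  simp [pvQW]
  omega

-- the prefix test of A's first loop is exactly pvGood 0 (i+1)
theorem pvCondPre_iff (cs : List Char) (i : Nat) (hi : i < cs.length) :
    ((decide (pvGetL (pvNeedL cs) 0 ≤ pvGetL (pvGetDp (pvDpOf cs) i) 0) &&
      decide (pvGetL (pvNeedL cs) 1 ≤ pvGetL (pvGetDp (pvDpOf cs) i) 1) &&
      decide (pvGetL (pvNeedL cs) 2 ≤ pvGetL (pvGetDp (pvDpOf cs) i) 2) &&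
      decide (pvGetL (pvNeedL cs) 3 ≤ pvGetL (pvGetDp (pvDpOf cs) i) 3)) = true) ↔
      pvGood cs 0 (i + 1) := by
  rw [pvDp_get cs i hi]
  unfold pvGood pvNeedL pvSnap pvGetL pvNeed
  simp [pvQW]
  omega

-- A's first loop: the found index is the least i with pvGood 0 (i+1)
theorem pvLast_lemma (cs : List Char) (hH : pvHot cs)
    (p : Nat → Bool) (hp : ∀ i, i < cs.length → (p i = true ↔ pvGood cs 0 (i + 1))) :
    ∃ last, (List.range cs.length).find? p = some last ∧ last < cs.length ∧
      pvGood cs 0 (last + 1) ∧ ∀ r ≤ last, ¬ pvGood cs 0 r := by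
  have hlen := pvHot_len_pos cs hH
  cases hfind : (List.range cs.length).find? p with
  | none =>
    exfalso
    have h1 := List.find?_eq_none.mp hfind (cs.length - 1) (by simp; omega)
    have h2 := hp (cs.length - 1) (by omega)
    rw [Nat.sub_add_cancel hlen] at h2
    exact h1 (h2.mpr (pvGood_full cs))
  | some last =>
    rw [List.find?_eq_some_iff_getElem] at hfind
    obtain ⟨hpl, k, hk, hkl, hbef⟩ := hfind
    simp only [List.getElem_range, List.length_range] at hkl hbef hk
    subst hkl
    refine ⟨_, rfl, hk, (hp _ hk).mp hpl, ?_⟩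
    intro r hr hg
    rcases Nat.eq_zero_or_pos r with h0 | h0
    · subst h0; exact pvGood_not_of_le cs hH (le_refl 0) hg
    · have hg' : pvGood cs 0 (r - 1 + 1) := by rwa [Nat.sub_add_cancel h0]
      exact absurd ((hp (r - 1) (by omega)).mpr hg') (by simpa using hbef (r - 1) (by omega))

-- A's two-pointer loop: result is below res and below every remaining window, and is
-- res or an actual window length
theorem pvLoopA_lemma (cs : List Char) (hH : pvHot cs) :
    ∀ k i j (res : Int), (cs.length - i) + (cs.length - j) ≤ k → i ≤ j → j ≤ cs.length →
    (∀ r ≤ j, ¬ pvGood cs (i + 1) r) →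
    pvLoopA (pvDpOf cs) (pvNeedL cs) cs.length i j res ≤ res ∧
    (∀ l r, i + 1 ≤ l → r ≤ cs.length → pvGood cs l r →
      pvLoopA (pvDpOf cs) (pvNeedL cs) cs.length i j res ≤ (r : Int) - (l : Int)) ∧
    (pvLoopA (pvDpOf cs) (pvNeedL cs) cs.length i j res = res ∨
      ∃ l r, pvGood cs l r ∧ r ≤ cs.length ∧
        pvLoopA (pvDpOf cs) (pvNeedL cs) cs.length i j res = (r : Int) - (l : Int)) := by
  intro k
  induction k with
  | zero =>
    intro i j res hk hij hjlen hnb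
    have hng : ¬ (i < cs.length ∧ j < cs.length) := by omega
    rw [pvLoopA, dif_neg hng]
    refine ⟨le_refl res, ?_, Or.inl rfl⟩
    intro l r hl hr hgd
    have hjl : j = cs.length := by omega
    exact absurd (pvGood_mono cs hl (le_refl r) hgd) (hnb r (by omega))
  | succ k ih =>
    intro i j res hk hij hjlen hnb
    by_cases hg : i < cs.length ∧ j < cs.length
    · rw [pvLoopA, dif_pos hg]
      by_cases hcond :
          (pvGetL (pvGetDp (pvDpOf cs) j) 0 - pvGetL (pvGetDp (pvDpOf cs) i) 0 < pvGetL (pvNeedL cs) 0 ∨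
           pvGetL (pvGetDp (pvDpOf cs) j) 1 - pvGetL (pvGetDp (pvDpOf cs) i) 1 < pvGetL (pvNeedL cs) 1 ∨
           pvGetL (pvGetDp (pvDpOf cs) j) 2 - pvGetL (pvGetDp (pvDpOf cs) i) 2 < pvGetL (pvNeedL cs) 2 ∨
           pvGetL (pvGetDp (pvDpOf cs) j) 3 - pvGetL (pvGetDp (pvDpOf cs) i) 3 < pvGetL (pvNeedL cs) 3)
      · rw [if_pos hcond]
        have hng : ¬ pvGood cs (i + 1) (j + 1) := (pvCondA_iff cs i j hg.1 hg.2).mp hcond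
        exact ih i (j + 1) res (by omega) (by omega) (by omega)
          (fun r hr => by
            rcases Nat.lt_or_ge r (j + 1) with h | h
            · exact hnb r (by omega)
            · have : r = j + 1 := by omega
              subst this; exact hng)
      · rw [if_neg hcond]
        have hgood : pvGood cs (i + 1) (j + 1) :=
          not_not.mp (fun hng => hcond ((pvCondA_iff cs i j hg.1 hg.2).mpr hng))
        have hilj : i < j := by
          rcases Nat.lt_or_ge i j with h | h
          · exact h
          · exfalso
            have : j = i := by omega
            subst this
            exact pvGood_not_of_le cs hH (le_refl (j + 1)) hgood
        obtain ⟨ih1, ih2, ih3⟩ := ih (i + 1) j (min ((j : Int) - (i : Int)) res)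
          (by omega) (by omega) (by omega)
          (fun r hr hgd => hnb r hr (pvGood_mono cs (by omega) (le_refl r) hgd))
        refine ⟨le_trans ih1 (min_le_right _ _), ?_, ?_⟩
        · intro l r hl hr hgd
          rcases Nat.lt_or_ge l (i + 2) with h | h
          · have hli : l = i + 1 := by omega
            subst hli
            have hrge : j + 1 ≤ r := by
              by_contra hc
              exact hnb r (by omega) hgd
            have h2 : min ((j : Int) - (i : Int)) res ≤ (j : Int) - (i : Int) := min_le_left _ _
            have h1 := ih1
            push_cast
            omega
          · exact ih2 l r h hr hgd
        · rcases ih3 with heq | ⟨l, r, hgd, hr, heq⟩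
          · rcases le_total ((j : Int) - (i : Int)) res with hm | hm
            · refine Or.inr ⟨i + 1, j + 1, hgood, by omega, ?_⟩
              rw [heq, min_eq_left hm]; push_cast; ring
            · left; rw [heq, min_eq_right hm]
          · exact Or.inr ⟨l, r, hgd, hr, heq⟩
    · rw [pvLoopA, dif_neg hg]
      refine ⟨le_refl res, ?_, Or.inl rfl⟩
      intro l r hl hr hgd
      exact absurd (pvGood_mono cs hl (le_refl r) hgd) (hnb r (by omega))

-- stepping the outside-counts dict
theorem pvCnt_dec (cs : List Char) (hQ : ∀ c ∈ cs, c ∈ pvQW) (l e : Nat) (he : e < cs.length) :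
    (pvCntOf cs l e).modify (cs.getD e ' ') 0 (· - 1) = pvCntOf cs l (e + 1) := by
  have hg : cs.getD e ' ' = cs[e] := List.getD_eq_getElem cs ' ' he
  have hmem : cs[e] ∈ pvQW := hQ _ (List.getElem_mem he)
  have ht : cs.take (e + 1) = cs.take e ++ [cs[e]] := List.take_succ_eq_append_getElem he
  rw [hg]
  simp only [pvQW, List.mem_cons, List.not_mem_nil, or_false] at hmem
  rcases hmem with h | h | h | h <;> rw [h] at ht ⊢ <;>
    simp only [pvCntOf, pvModQ, pvModW, pvModE, pvModR] <;>
    unfold pvOutC <;> rw [ht] <;> unfold pvMkCnt <;>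
    simp [List.count_append] <;> omega

theorem pvCnt_inc (cs : List Char) (hQ : ∀ c ∈ cs, c ∈ pvQW) (l e : Nat) (hl : l < cs.length) :
    (pvCntOf cs l e).modify (cs.getD l ' ') 0 (· + 1) = pvCntOf cs (l + 1) e := by
  have hg : cs.getD l ' ' = cs[l] := List.getD_eq_getElem cs ' ' hl
  have hmem : cs[l] ∈ pvQW := hQ _ (List.getElem_mem hl)
  have ht : cs.take (l + 1) = cs.take l ++ [cs[l]] := List.take_succ_eq_append_getElem hl
  rw [hg]
  simp only [pvQW, List.mem_cons, List.not_mem_nil, or_false] at hmem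
  rcases hmem with h | h | h | h <;> rw [h] at ht ⊢ <;>
    simp only [pvCntOf, pvModQ, pvModW, pvModE, pvModR] <;>
    unfold pvOutC <;> rw [ht] <;> unfold pvMkCnt <;>
    simp [List.count_append] <;> omega

-- B's inner while loop
theorem pvShrink_lemma (cs : List Char) (hH : pvHot cs) (hQ : ∀ c ∈ cs, c ∈ pvQW)
    (e : Nat) (he : e < cs.length) :
    ∀ k left (res : Int), e + 1 - left ≤ k → left ≤ e + 1 →
    (∀ l, l < left → res ≤ (e : Int) + 1 - (l : Int)) →
    (∀ l r, r ≤ e → pvGood cs l r → res ≤ (r : Int) - (l : Int)) →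
    (∃ l r, pvGood cs l r ∧ r ≤ cs.length ∧ res = (r : Int) - (l : Int)) →
    (pvShrink cs ((pvN cs : Int)) e (pvCntOf cs left (e + 1)) left res).1 =
        pvCntOf cs (pvShrink cs ((pvN cs : Int)) e (pvCntOf cs left (e + 1)) left res).2.1 (e + 1) ∧
    (pvShrink cs ((pvN cs : Int)) e (pvCntOf cs left (e + 1)) left res).2.1 ≤ e + 1 ∧
    (∀ l, l < (pvShrink cs ((pvN cs : Int)) e (pvCntOf cs left (e + 1)) left res).2.1 →
      (pvShrink cs ((pvN cs : Int)) e (pvCntOf cs left (e + 1)) left res).2.2 ≤ (e : Int) + 1 - (l : Int)) ∧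
    (∀ l r, r ≤ e + 1 → pvGood cs l r →
      (pvShrink cs ((pvN cs : Int)) e (pvCntOf cs left (e + 1)) left res).2.2 ≤ (r : Int) - (l : Int)) ∧
    (∃ l r, pvGood cs l r ∧ r ≤ cs.length ∧
      (pvShrink cs ((pvN cs : Int)) e (pvCntOf cs left (e + 1)) left res).2.2 = (r : Int) - (l : Int)) := by
  have hstop : ∀ left (res : Int), left ≤ e + 1 →
      ¬ (left ≤ e ∧ pvAllLE (pvCntOf cs left (e + 1)) ((pvN cs : Int)) = true) →
      (∀ l, l < left → res ≤ (e : Int) + 1 - (l : Int)) →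
      (∀ l r, r ≤ e → pvGood cs l r → res ≤ (r : Int) - (l : Int)) →
      (∀ l r, r ≤ e + 1 → pvGood cs l r → res ≤ (r : Int) - (l : Int)) := by
    intro left res hle hgd hq1 hq2 l r hr hg
    rcases Nat.lt_or_ge r (e + 1) with h | h
    · exact hq2 l r (by omega) hg
    · have hre : r = e + 1 := by omega
      subst hre
      rcases Nat.lt_or_ge l left with h2 | h2
      · have := hq1 l h2; push_cast; omega
      · exfalso
        rcases Decidable.not_and_iff_not_or_not.mp hgd with h3 | h3
        · exact pvGood_not_of_le cs hH (by omega) hg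
        · exact h3 ((pvAllLE_iff_good cs left (e + 1) (by omega)).mpr
            (pvGood_mono cs h2 (le_refl (e + 1)) hg))
  intro k
  induction k with
  | zero =>
    intro left res hk hle hq1 hq2 hq3
    have hgd : ¬ (left ≤ e ∧ pvAllLE (pvCntOf cs left (e + 1)) ((pvN cs : Int)) = true) := by
      intro h; omega
    rw [pvShrink, if_neg hgd]
    exact ⟨rfl, hle, hq1, hstop left res hle hgd hq1 hq2, hq3⟩
  | succ k ih =>
    intro left res hk hle hq1 hq2 hq3
    rw [pvShrink]
    by_cases hgd : left ≤ e ∧ pvAllLE (pvCntOf cs left (e + 1)) ((pvN cs : Int)) = true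
    · rw [if_pos hgd]
      have hlt : left < cs.length := by omega
      have hgood : pvGood cs left (e + 1) :=
        (pvAllLE_iff_good cs left (e + 1) (by omega)).mp hgd.2
      rw [pvCnt_inc cs hQ left (e + 1) hlt]
      have ha : (if (e : Int) - (left : Int) + 1 < res then (e : Int) - (left : Int) + 1 else res) ≤ res := by
        split_ifs <;> omega
      have hb : (if (e : Int) - (left : Int) + 1 < res then (e : Int) - (left : Int) + 1 else res) ≤
          (e : Int) + 1 - (left : Int) := by
        split_ifs <;> omega
      exact ih (left + 1)
        (if (e : Int) - (left : Int) + 1 < res then (e : Int) - (left : Int) + 1 else res)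
        (by omega) (by omega)
        (fun l hl => by
          rcases Nat.lt_or_ge l left with h | h
          · have := hq1 l h; omega
          · have hll : l = left := by omega
            subst hll; exact hb)
        (fun l r hr hg => le_trans ha (hq2 l r hr hg))
        (by
          split_ifs with hcl
          · exact ⟨left, e + 1, hgood, by omega, by push_cast; ring⟩
          · exact hq3)
    · rw [if_neg hgd]
      exact ⟨rfl, hle, hq1, hstop left res hle hgd hq1 hq2, hq3⟩

-- B's outer loop
theorem pvOuter_lemma (cs : List Char) (hH : pvHot cs) (hQ : ∀ c ∈ cs, c ∈ pvQW) :
    ∀ k e left (res : Int), cs.length - e ≤ k → e ≤ cs.length → left ≤ e →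
    (∀ l, l < left → res ≤ (e : Int) - (l : Int)) →
    (∀ l r, r ≤ e → pvGood cs l r → res ≤ (r : Int) - (l : Int)) →
    (∃ l r, pvGood cs l r ∧ r ≤ cs.length ∧ res = (r : Int) - (l : Int)) →
    (∀ l r, r ≤ cs.length → pvGood cs l r →
      (pvOuter cs ((pvN cs : Int)) e (pvCntOf cs left e, left, res)).2.2 ≤ (r : Int) - (l : Int)) ∧
    (∃ l r, pvGood cs l r ∧ r ≤ cs.length ∧
      (pvOuter cs ((pvN cs : Int)) e (pvCntOf cs left e, left, res)).2.2 = (r : Int) - (l : Int)) := by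
  intro k
  induction k with
  | zero =>
    intro e left res hk helen hle hq1 hq2 hq3
    have he : e = cs.length := by omega
    subst he
    rw [pvOuter, dif_neg (by omega)]
    exact ⟨hq2, hq3⟩
  | succ k ih =>
    intro e left res hk helen hle hq1 hq2 hq3
    by_cases he : e < cs.length
    · rw [pvOuter, dif_pos he]
      simp only
      rw [pvCnt_dec cs hQ left e he]
      obtain ⟨hs1, hs2, hs3, hs4, hs5⟩ :=
        pvShrink_lemma cs hH hQ e he (e + 1 - left) left res (le_refl _) (by omega)
          (fun l hl => by have := hq1 l hl; omega)
          (fun l r hr hg => hq2 l r (by omega) hg)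
          hq3
      have hsplit : pvShrink cs ((pvN cs : Int)) e (pvCntOf cs left (e + 1)) left res =
          (pvCntOf cs (pvShrink cs ((pvN cs : Int)) e (pvCntOf cs left (e + 1)) left res).2.1 (e + 1),
           (pvShrink cs ((pvN cs : Int)) e (pvCntOf cs left (e + 1)) left res).2.1,
           (pvShrink cs ((pvN cs : Int)) e (pvCntOf cs left (e + 1)) left res).2.2) := by
        rw [← hs1]
      rw [hsplit]
      exact ih (e + 1) _ _ (by omega) (by omega) hs2
        (fun l hl => by have := hs3 l hl; push_cast; omega)
        (fun l r hr hg => hs4 l r (by omega) hg)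
        hs5
    · rw [pvOuter, dif_neg he]
      have he' : e = cs.length := by omega
      subst he'
      exact ⟨hq2, hq3⟩

-- ===== VERDICT (by name: the statement is the Claim_ definition above) =====
theorem balancedString_spec : Claim_equal_balancedString := by
  intro s _hdom hpre
  unfold Spec_balancedString
  have hQ : ∀ c ∈ s.toList, c ∈ pvQW := by
    intro c hc
    simpa [pvQW] using List.all_eq_true.mp hpre c hc
  simp only [balancedString, balancedString_alt, pvInitA s.toList hQ, pvCntFold0 s.toList hQ,
    pvNInt]
  have hpn : ((s.toList.length / 4 : Nat) : Int) = ((pvN s.toList : Int)) := rfl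
  rw [hpn]
  simp only [pvNeedA s.toList]
  by_cases hsum : (pvNeedL s.toList).sum = 0
  · -- already balanced: both sides return 0
    have hnh : ¬ pvHot s.toList := (pvNeedSum_iff s.toList).mp hsum
    rw [if_pos hsum, if_pos ((pvAllLE_iff_good s.toList 0 0 (le_refl 0)).mpr
      ((pvGood_zero_zero_iff s.toList).mpr hnh))]
  · -- unbalanced: both sides compute the minimal window
    have hH : pvHot s.toList := by
      by_contra hc
      exact hsum ((pvNeedSum_iff s.toList).mpr hc)
    have hBne : ¬ pvAllLE (pvCntOf s.toList 0 0) ((pvN s.toList : Int)) = true := by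
      intro hc
      exact ((pvGood_zero_zero_iff s.toList).mp
        ((pvAllLE_iff_good s.toList 0 0 (le_refl 0)).mp hc)) hH
    rw [if_neg hsum, if_neg hBne]
    obtain ⟨last, hfind, hlast_lt, hlast_good, hlast_min⟩ :=
      pvLast_lemma s.toList hH
        (fun i =>
          decide (pvGetL (pvNeedL s.toList) 0 ≤ pvGetL (pvGetDp (pvDpOf s.toList) i) 0) &&
                decide (pvGetL (pvNeedL s.toList) 1 ≤ pvGetL (pvGetDp (pvDpOf s.toList) i) 1) &&
              decide (pvGetL (pvNeedL s.toList) 2 ≤ pvGetL (pvGetDp (pvDpOf s.toList) i) 2) &&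
            decide (pvGetL (pvNeedL s.toList) 3 ≤ pvGetL (pvGetDp (pvDpOf s.toList) i) 3))
        (fun i hi => pvCondPre_iff s.toList i hi)
    rw [hfind]
    simp only
    -- A's loop
    obtain ⟨hA1, hA2, hA3⟩ :=
      pvLoopA_lemma s.toList hH (s.toList.length + s.toList.length) 0 last ((last : Int) + 1)
        (by omega) (by omega) (by omega)
        (fun r hr hg => hlast_min r hr (pvGood_mono s.toList (by omega) (le_refl r) hg))
    -- B's loop
    obtain ⟨hB2, hB3⟩ :=
      pvOuter_lemma s.toList hH hQ s.toList.length 0 0 ((s.toList.length : Int))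
        (le_refl _) (by omega) (le_refl 0)
        (fun l hl => absurd hl (by omega))
        (fun l r hr hg => by
          have : r = 0 := by omega
          subst this
          exact absurd hg (pvGood_not_of_le s.toList hH (Nat.zero_le l)))
        ⟨0, s.toList.length, pvGood_full s.toList, le_refl _, by simp⟩
    -- A ≤ B
    apply le_antisymm
    · obtain ⟨l, r, hg, hr, heq⟩ := hB3
      rw [heq]
      rcases Nat.eq_zero_or_pos l with h0 | h0
      · subst h0
        have hrge : last + 1 ≤ r := by
          by_contra hc
          exact hlast_min r (by omega) hg
        have := hA1
        push_cast
        omega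
      · exact hA2 l r (by omega) hr hg
    · rcases hA3 with heq | ⟨l, r, hg, hr, heq⟩
      · rw [heq]
        have := hB2 0 (last + 1) (by omega) hlast_good
        push_cast at this ⊢
        omega
      · rw [heq]
        exact hB2 l r hr hg
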